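-- pv_equiv track=rewrite | github.com/dhrumil2312/RNAWebsite_v2 | QLRNA/Extract_UBP.py | type_4_ubp
-- ===== SOURCE A (Python) =====
-- def type_4_ubp(dp):
--     ubp_info = []
--     i = 0
--     st_i = len(dp)
--     while i < len(dp):
--         if dp[i] == "(":
--             st_i = i
--         elif dp[i] == ")" and i > st_i:
--             ed_i = i
--             if ed_i > st_i + 1:
--                 ubp_info.append([st_i,ed_i])
--             st_i = len(dp)
--         i += 1
--     return ubp_info
-- ===== SOURCE B (Python) =====
-- import re
--
-- def type_4_ubp(dp):
--     # each match = '(' + one-or-more non-paren chars + ')', i.e. exactly the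
--     # pairs A's state machine emits; regex engine does the scan.
--     return [[m.start(), m.end() - 1] for m in re.finditer(r'\([^()]+\)', dp)]
-- ===== Notes on version B (the rewrite author's own statement) =====
-- stated objective: idiomatic
-- what changed: Replaced the manual index loop with tracker variable and sentinel reset by a single re.finditer over the pattern \([^()]+\), emitting [m.start(), m.end()-1] per match.
import Mathlib
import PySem

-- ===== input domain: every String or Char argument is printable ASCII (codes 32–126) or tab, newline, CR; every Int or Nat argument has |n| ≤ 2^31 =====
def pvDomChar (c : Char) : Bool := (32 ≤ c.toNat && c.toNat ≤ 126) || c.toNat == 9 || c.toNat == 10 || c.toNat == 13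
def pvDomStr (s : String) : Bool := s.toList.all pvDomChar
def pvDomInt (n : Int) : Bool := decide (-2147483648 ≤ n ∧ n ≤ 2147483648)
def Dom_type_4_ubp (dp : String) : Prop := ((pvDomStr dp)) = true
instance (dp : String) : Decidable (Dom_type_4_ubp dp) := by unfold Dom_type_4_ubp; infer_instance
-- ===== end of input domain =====

-- B replaces A's manual index loop by a regex scan (idiomatic); same return value everywhere.

-- ===== PORT A =====
-- literal transliteration of A's while loop: fold over range(len(dp)) with state (ubp_info, st_i)
def type_4_ubp (dp : String) : List (List Int) :=
  let n : Int := PySem.Str.len dp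
  ((PySem.List.pyRange 0 n 1).foldl
    (fun (st : List (List Int) × Int) i =>
      if PySem.Str.pyGet? dp i = some '(' then (st.1, i)
      else if PySem.Str.pyGet? dp i = some ')' ∧ i > st.2 then
        ((if i > st.2 + 1 then st.1 ++ [[st.2, i]] else st.1), n)
      else st)
    ([], n)).1

-- ===== PORT B =====
-- Hand port of Source B's re.finditer over the FIXED pattern \([^()]+\): exact because
-- [^()]+ can only stop at the first parenthesis (no useful backtracking), failed
-- attempt positions between a '(' and the next parenthesis are all non-'(' and fail
-- immediately, so the engine's scan is exactly this two-mode recursion.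
mutual
  -- mode 1: looking for the next '(' (next attempt position that can match)
  def ubpFind (cs : List Char) (j : Int) : List (List Int) :=
    match cs with
    | [] => []
    | c :: rest => if c = '(' then ubpMatch rest (j + 1) j else ubpFind rest (j + 1)
  -- mode 2: inside [^()]+ after the '(' at position s; j = current position
  def ubpMatch (cs : List Char) (j s : Int) : List (List Int) :=
    match cs with
    | [] => []
    | c :: rest =>
      if c = ')' then
        if j > s + 1 then [s, j] :: ubpFind rest (j + 1) else ubpFind rest (j + 1)
      else if c = '(' then ubpMatch rest (j + 1) j
      else ubpMatch rest (j + 1) s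
end

def type_4_ubp_alt (dp : String) : List (List Int) := ubpFind dp.toList 0

-- ===== PRECONDITION & SPEC =====
def Spec_type_4_ubp (dp : String) (out : List (List Int)) : Prop := out = type_4_ubp_alt dp
instance (dp : String) (out : List (List Int)) : Decidable (Spec_type_4_ubp dp out) := by unfold Spec_type_4_ubp; infer_instance

-- ===== CLAIM (what is proved, stated in full; the proofs are below) =====
def Claim_equal_type_4_ubp : Prop := ∀ (dp : String), Dom_type_4_ubp dp → Spec_type_4_ubp dp (type_4_ubp dp)

-- ===== LEMMAS AND PROOFS =====

theorem ubp_main (dp : String) :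
    ∀ (suf pre : List Char), dp.toList = pre ++ suf →
    ∀ (acc : List (List Int)) (st : Int),
      (st = PySem.Str.len dp ∨ (0 ≤ st ∧ st < (pre.length : Int))) →
      ((PySem.List.pyRange (pre.length : Int) (PySem.Str.len dp) 1).foldl
        (fun (t : List (List Int) × Int) i =>
          if PySem.Str.pyGet? dp i = some '(' then (t.1, i)
          else if PySem.Str.pyGet? dp i = some ')' ∧ i > t.2 then
            ((if i > t.2 + 1 then t.1 ++ [[t.2, i]] else t.1), PySem.Str.len dp)
          else t)
        (acc, st)).1 =
      acc ++ (if st = PySem.Str.len dp then ubpFind suf (pre.length : Int)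
              else ubpMatch suf (pre.length : Int) st) := by
  intro suf
  induction suf with
  | nil =>
    intro pre hpre acc st hst
    have hn : PySem.Str.len dp = (pre.length : Int) := by
      simp [PySem.Str.len_eq, hpre]
    rw [hn, PySem.List.pyRange_one_eq_nil le_rfl]
    simp [ubpFind, ubpMatch]
  | cons c rest ih =>
    intro pre hpre acc st hst
    have hn : PySem.Str.len dp = ((pre.length : Int) + (rest.length : Int) + 1) := by
      simp [PySem.Str.len_eq, hpre]; ring
    have hlt : (pre.length : Int) < PySem.Str.len dp := by rw [hn]; omega
    have hget : PySem.Str.pyGet? dp (pre.length : Int) = some c := by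
      simp [hpre]
    have hpre' : dp.toList = (pre ++ [c]) ++ rest := by simp [hpre]
    have hlen' : (((pre ++ [c]).length : Nat) : Int) = (pre.length : Int) + 1 := by
      simp
    rw [PySem.List.pyRange_one_cons hlt]
    simp only [List.foldl_cons]
    have hne : ((pre.length : Int)) ≠ PySem.Str.len dp := ne_of_lt hlt
    have hgetL : dp.toList[pre.length]? = some c := by
      simpa using hget
    by_cases hc1 : c = '('
    · subst hc1
      rw [if_pos hget]
      have h2 := ih (pre ++ ['(']) hpre' acc (pre.length : Int)
        (Or.inr ⟨by positivity, by rw [hlen']; omega⟩)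
      rw [hlen', if_neg hne] at h2
      rw [h2]
      rcases hst with h | h
      · rw [if_pos h]
        simp [ubpFind]
      · rw [if_neg (by omega : st ≠ PySem.Str.len dp)]
        simp [ubpMatch]
    · rw [if_neg (by simp [hgetL, hc1])]
      by_cases hc2 : c = ')'
      · subst hc2
        rcases hst with h | h
        · -- sentinel: i > st is false
          rw [if_neg (fun hcon => absurd hcon.2 (by omega))]
          have h2 := ih (pre ++ [')']) hpre' acc st (Or.inl h)
          rw [hlen', if_pos h] at h2
          rw [h2, if_pos h]
          simp [ubpFind]
        · -- matched: i > st holds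
          rw [if_pos ⟨hget, by omega⟩]
          by_cases h3 : (pre.length : Int) > st + 1
          · rw [if_pos h3]
            have h2 := ih (pre ++ [')']) hpre' (acc ++ [[st, (pre.length : Int)]])
              (PySem.Str.len dp) (Or.inl rfl)
            rw [hlen', if_pos rfl] at h2
            rw [h2, if_neg (by omega : st ≠ PySem.Str.len dp)]
            simp [ubpMatch, if_pos h3]
          · rw [if_neg h3]
            have h2 := ih (pre ++ [')']) hpre' acc (PySem.Str.len dp) (Or.inl rfl)
            rw [hlen', if_pos rfl] at h2
            rw [h2, if_neg (by omega : st ≠ PySem.Str.len dp)]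
            simp [ubpMatch, if_neg h3]
      · -- ordinary character: state unchanged
        rw [if_neg (by simp [hgetL, hc2])]
        have h2 := ih (pre ++ [c]) hpre' acc st
          (by rcases hst with h | h; exact Or.inl h; exact Or.inr ⟨h.1, by rw [hlen']; omega⟩)
        rw [hlen'] at h2
        rw [h2]
        rcases hst with h | h
        · rw [if_pos h, if_pos h]
          simp [ubpFind, hc1]
        · rw [if_neg (by omega : st ≠ PySem.Str.len dp), if_neg (by omega : st ≠ PySem.Str.len dp)]
          simp [ubpMatch, hc1, hc2]

-- ===== VERDICT (by name: the statement is the Claim_ definition above) =====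
theorem type_4_ubp_spec : Claim_equal_type_4_ubp := by
  intro dp _
  unfold Spec_type_4_ubp type_4_ubp type_4_ubp_alt
  have h := ubp_main dp dp.toList [] rfl [] (PySem.Str.len dp) (Or.inl rfl)
  simpa using h
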